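-- pv_equiv track=rewrite | github.com/argens-hku/Bridge | src/Bidding.py | sequenceToString
-- ===== SOURCE A (Python) =====
-- _debug_level = 0
--
-- def padBid (bid, bracket = False):
--
-- 	pad = ""
--
-- 	if len (bid) == 1:
-- 		pad = " "
--
-- 	if bracket:
-- 		return "(" + bid + ")" + pad
-- 	return bid + pad
--
-- def sequenceToString (sequence, mode):
--
-- 	if mode == "Uncontested":
--
-- 		output = ""
-- 		counter = 0
--
-- 		for bid in sequence:
-- 			output += padBid (bid)
-- 			counter += 1
-- 			if counter == 2:
-- 				counter = 0
-- 				output += "\n"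
-- 			else:
-- 				output += "-"
--
-- 		return output [:-1]
--
-- 	if mode == "Competitive":
--
-- 		output = ""
--
-- 		if len (sequence) % 2 == 1 and len (sequence) > 3:
-- 			brac_flag = True
-- 			counter = 1
-- 			output += "   "
-- 		else:
-- 			brac_flag = False
-- 			counter = 0
--
-- 		for bid in sequence:
--
--
-- 			if brac_flag:
-- 				output += padBid (bid, True)
-- 			else:
-- 				output += padBid (bid)
--
-- 			brac_flag = not brac_flag
-- 			counter += 1
--
-- 			if counter == 4:
-- 				counter = 0
-- 				output += "\n"
-- 			else:
-- 				output += "-"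
--
-- 		return output [:-1]
--
-- 	if _debug_level >= 2:
-- 		print ("Unsupported Mode -- sequenceToString")
-- 	return ""
-- ===== SOURCE B (Python) =====
-- _debug_level = 0
--
-- def padBid (bid, bracket = False):
--
-- 	pad = ""
--
-- 	if len (bid) == 1:
-- 		pad = " "
--
-- 	if bracket:
-- 		return "(" + bid + ")" + pad
-- 	return bid + pad
--
-- def _chunk (cells, n):
-- 	rows = []
-- 	while cells:
-- 		rows.append(cells[:n])
-- 		cells = cells[n:]
-- 	return rows
--
-- def sequenceToString (sequence, mode):
--
-- 	if mode == "Uncontested":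
-- 		cells = [padBid(b) for b in sequence]
-- 		rows = _chunk(cells, 2)
-- 		return "\n".join("-".join(r) for r in rows)
--
-- 	if mode == "Competitive":
-- 		prefix = len(sequence) % 2 == 1 and len(sequence) > 3
-- 		cells = [padBid(b, (i % 2 == 0) == prefix) for i, b in enumerate(sequence)]
-- 		if prefix:
-- 			rows = [cells[:3]] + _chunk(cells[3:], 4)
-- 			return "   " + "\n".join("-".join(r) for r in rows)
-- 		rows = _chunk(cells, 4)
-- 		return "\n".join("-".join(r) for r in rows)
--
-- 	if _debug_level >= 2:
-- 		print ("Unsupported Mode -- sequenceToString")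
-- 	return ""
-- ===== Notes on version B (the rewrite author's own statement) =====
-- stated objective: simpler
-- what changed: Replaces A's single stateful loop (string accumulator, wrap-around counter, toggling bracket flag, trailing-character strip) by format-then-group: map each bid to its formatted cell deciding brackets from its index parity, chunk the cell list into rows (2 for Uncontested; 3-then-4 or 4 for Competitive), and join rows with '-' and '\n', which needs no trailing strip.
import Mathlib
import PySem

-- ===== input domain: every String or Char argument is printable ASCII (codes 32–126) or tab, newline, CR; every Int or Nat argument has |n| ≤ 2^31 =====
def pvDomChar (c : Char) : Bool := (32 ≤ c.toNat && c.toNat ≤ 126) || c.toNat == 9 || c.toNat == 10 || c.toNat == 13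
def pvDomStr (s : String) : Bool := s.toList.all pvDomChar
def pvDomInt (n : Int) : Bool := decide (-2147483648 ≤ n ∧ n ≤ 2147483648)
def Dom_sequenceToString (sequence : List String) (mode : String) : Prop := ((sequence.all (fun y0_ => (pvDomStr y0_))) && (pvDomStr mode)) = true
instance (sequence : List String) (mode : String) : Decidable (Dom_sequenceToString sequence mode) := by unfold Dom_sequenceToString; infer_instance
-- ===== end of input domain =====

-- B regroups A's stateful loop (accumulator + wrap-around counter + bracket flag + trailing strip)
-- into format-then-group: format cells by index parity, chunk into rows, join with '-' and '\n' (objective: simpler).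

-- ===== PORT A =====
-- A's helper padBid (pad single-char bids with a space, optionally bracket)
def padBidA (bid : String) (bracket : Bool) : List Char :=
  let pad : List Char := if bid.toList.length = 1 then [' '] else []
  if bracket then ('(' :: bid.toList ++ [')']) ++ pad else bid.toList ++ pad

-- A's Uncontested loop body: state = (output, counter)
def stepU (st : List Char × Int) (bid : String) : List Char × Int :=
  let out := st.1 ++ padBidA bid false
  let c := st.2 + 1
  if c = 2 then (out ++ ['\n'], 0) else (out ++ ['-'], c)

-- A's Competitive loop body: state = (output, brac_flag, counter)
def stepC (st : List Char × Bool × Int) (bid : String) : List Char × Bool × Int :=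
  let out := if st.2.1 then st.1 ++ padBidA bid true else st.1 ++ padBidA bid false
  let f := !st.2.1
  let c := st.2.2 + 1
  if c = 4 then (out ++ ['\n'], f, 0) else (out ++ ['-'], f, c)

def sequenceToString (sequence : List String) (mode : String) : String :=
  if mode = "Uncontested" then
    let r := List.foldl stepU (([] : List Char), (0 : Int)) sequence
    String.ofList (PySem.List.slice r.1 none (some (-1)))
  else if mode = "Competitive" then
    -- output = ""; the if sets output/brac_flag/counter, folded into one initial state
    let init : List Char × Bool × Int :=
      if PySem.Int.mod (sequence.length : Int) 2 = 1 ∧ (sequence.length : Int) > 3 then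
        ("   ".toList, true, 1)
      else ([], false, 0)
    let r := List.foldl stepC init sequence
    String.ofList (PySem.List.slice r.1 none (some (-1)))
  else
    -- _debug_level = 0 < 2, so the debug print never fires
    ""

-- ===== PORT B =====
-- B's padBid: one expression
def padBidB (bid : List Char) (bracket : Bool) : List Char :=
  (if bracket then '(' :: bid ++ [')'] else bid) ++ (if bid.length = 1 then [' '] else [])

-- B's _chunk loop: each iteration emits cells[:n] and continues with cells[n:], rendered as the
-- structural recursion on the list; the slices have nonnegative literal bounds, ported exactly as
-- take / drop (n is only ever 2 or 4, so xs[n:] on x :: rest is rest.drop (n - 1))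
def chunkB (xs : List (List Char)) (n : Nat) : List (List (List Char)) :=
  match xs with
  | [] => []
  | x :: rest => (x :: rest).take n :: chunkB (rest.drop (n - 1)) n
termination_by xs.length
decreasing_by simp only [List.length_drop, List.length_cons]; omega

def sequenceToString_alt (sequence : List String) (mode : String) : String :=
  if mode = "Uncontested" then
    let cells := sequence.map (fun b => padBidB b.toList false)
    String.ofList (PySem.Chars.join ['\n'] ((chunkB cells 2).map (fun r => PySem.Chars.join ['-'] r)))
  else if mode = "Competitive" then
    let pfx : Bool := decide (PySem.Int.mod (sequence.length : Int) 2 = 1 ∧ (sequence.length : Int) > 3)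
    let cells := (PySem.List.enumerate sequence).map
      (fun p => padBidB p.2.toList ((decide (PySem.Int.mod p.1 2 = 0)) == pfx))
    if pfx then
      String.ofList ("   ".toList ++
        PySem.Chars.join ['\n'] ((cells.take 3 :: chunkB (cells.drop 3) 4).map (fun r => PySem.Chars.join ['-'] r)))
    else
      String.ofList (PySem.Chars.join ['\n'] ((chunkB cells 4).map (fun r => PySem.Chars.join ['-'] r)))
  else
    ""

-- ===== PRECONDITION & SPEC =====
def Spec_sequenceToString (sequence : List String) (mode : String) (out : String) : Prop := out = sequenceToString_alt sequence mode
instance (sequence : List String) (mode : String) (out : String) : Decidable (Spec_sequenceToString sequence mode out) := by unfold Spec_sequenceToString; infer_instance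

-- ===== CLAIM (what is proved, stated in full; the proofs are below) =====
def Claim_equal_sequenceToString : Prop := ∀ (sequence : List String) (mode : String), Dom_sequenceToString sequence mode → Spec_sequenceToString sequence mode (sequenceToString sequence mode)

-- ===== LEMMAS AND PROOFS =====

-- what A's loop emits for the remaining cells, starting at counter phase c (threshold n)
def bodyAcc (n : Nat) : List (List Char) → Nat → List Char
  | [], _ => []
  | x :: xs, c => x ++ (if c + 1 = n then '\n' else '-') :: bodyAcc n xs (if c + 1 = n then 0 else c + 1)

-- the formatted cells of the Competitive loop, starting with bracket flag f
def cellsA : List String → Bool → List (List Char)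
  | [], _ => []
  | b :: bs, f => padBidA b f :: cellsA bs (!f)

-- induction skeletons for chunk size 2 and 4
def ind2 : List (List Char) → Nat
  | [] => 0
  | [_] => 0
  | _ :: _ :: rest => ind2 rest

def ind4 : List (List Char) → Nat
  | [] => 0
  | [_] => 0
  | [_, _] => 0
  | [_, _, _] => 0
  | _ :: _ :: _ :: _ :: rest => ind4 rest

lemma padEq (bid : String) (br : Bool) : padBidB bid.toList br = padBidA bid br := by
  cases br <;> simp [padBidA, padBidB]

lemma bodyAcc_ne_nil (n : Nat) (x : List Char) (xs : List (List Char)) (c : Nat) :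
    bodyAcc n (x :: xs) c ≠ [] := by
  simp [bodyAcc]

lemma length_cellsA (bids : List String) (f : Bool) : (cellsA bids f).length = bids.length := by
  induction bids generalizing f with
  | nil => simp [cellsA]
  | cons b bs ih => simp [cellsA, ih]

lemma chunkB_nil (n : Nat) : chunkB [] n = [] := by
  rw [chunkB]

lemma chunkB_cons (x : List Char) (xs : List (List Char)) (n : Nat) :
    chunkB (x :: xs) n = (x :: xs).take n :: chunkB (xs.drop (n - 1)) n := by
  rw [chunkB]

lemma foldU (bids : List String) (out : List Char) (c : Nat) (hc : c < 2) :
    (List.foldl stepU (out, (c : Int)) bids).1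
      = out ++ bodyAcc 2 (bids.map (fun b => padBidA b false)) c := by
  induction bids generalizing out c with
  | nil => simp [bodyAcc]
  | cons b bs ih =>
    simp only [List.foldl_cons, List.map_cons, stepU]
    by_cases h2 : c + 1 = 2
    · have hi : ((c : Int) + 1 = 2) := by omega
      rw [if_pos hi]
      have := ih (out ++ padBidA b false ++ ['\n']) 0 (by omega)
      simp only [Nat.cast_zero] at this
      rw [this]
      simp [bodyAcc, h2, List.append_assoc]
    · have hi : ¬ ((c : Int) + 1 = 2) := by omega
      rw [if_neg hi]
      have hcast : ((c : Int) + 1) = ((c + 1 : Nat) : Int) := by push_cast; ring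
      rw [hcast]
      rw [ih (out ++ padBidA b false ++ ['-']) (c + 1) (by omega)]
      simp [bodyAcc, h2, List.append_assoc]

lemma foldC (bids : List String) (out : List Char) (f : Bool) (c : Nat) (hc : c < 4) :
    (List.foldl stepC (out, f, (c : Int)) bids).1
      = out ++ bodyAcc 4 (cellsA bids f) c := by
  induction bids generalizing out f c with
  | nil => simp [bodyAcc, cellsA]
  | cons b bs ih =>
    simp only [List.foldl_cons, stepC, cellsA]
    have hout : (if f = true then out ++ padBidA b true else out ++ padBidA b false)
        = out ++ padBidA b f := by cases f <;> simp
    rw [hout]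
    by_cases h4 : c + 1 = 4
    · have hi : ((c : Int) + 1 = 4) := by omega
      rw [if_pos hi]
      have := ih (out ++ padBidA b f ++ ['\n']) (!f) 0 (by omega)
      simp only [Nat.cast_zero] at this
      rw [this]
      simp [bodyAcc, h4, List.append_assoc]
    · have hi : ¬ ((c : Int) + 1 = 4) := by omega
      rw [if_neg hi]
      have hcast : ((c : Int) + 1) = ((c + 1 : Nat) : Int) := by push_cast; ring
      rw [hcast]
      rw [ih (out ++ padBidA b f ++ ['-']) (!f) (c + 1) (by omega)]
      simp [bodyAcc, h4, List.append_assoc]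

lemma joinChunk2 (cells : List (List Char)) :
    PySem.Chars.join ['\n'] ((chunkB cells 2).map (fun r => PySem.Chars.join ['-'] r))
      = (bodyAcc 2 cells 0).dropLast := by
  induction cells using ind2.induct with
  | case1 => simp [chunkB_nil, PySem.Chars.join_nil, bodyAcc]
  | case2 x =>
    simp [chunkB_cons, chunkB_nil, PySem.Chars.join_singleton, bodyAcc]
  | case3 x y rest ih =>
    rw [chunkB_cons]
    simp only [List.take_succ_cons, List.take_zero, List.drop_succ_cons, List.drop_zero,
      List.map_cons]
    cases rest with
    | nil =>
      simp only [chunkB_nil, List.map_nil, PySem.Chars.join_singleton,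
        PySem.Chars.join_cons_cons]
      have hb : bodyAcc 2 [x, y] 0 = (x ++ '-' :: y) ++ ['\n'] := by
        simp [bodyAcc]
      rw [hb, List.dropLast_concat]
      simp
    | cons r rs =>
      obtain ⟨q, qs, hch⟩ : ∃ q qs,
          (chunkB (r :: rs) 2).map (fun r => PySem.Chars.join ['-'] r) = q :: qs := by
        rw [chunkB_cons]; exact ⟨_, _, rfl⟩
      rw [hch, PySem.Chars.join_cons_cons, ← hch, ih]
      have hb : bodyAcc 2 (x :: y :: r :: rs) 0
          = (x ++ '-' :: y ++ ['\n']) ++ bodyAcc 2 (r :: rs) 0 := by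
        simp [bodyAcc]
      rw [hb, List.dropLast_append_of_ne_nil (bodyAcc_ne_nil 2 r rs 0)]
      simp [PySem.Chars.join_cons_cons, PySem.Chars.join_singleton]

lemma joinChunk4 (cells : List (List Char)) :
    PySem.Chars.join ['\n'] ((chunkB cells 4).map (fun r => PySem.Chars.join ['-'] r))
      = (bodyAcc 4 cells 0).dropLast := by
  induction cells using ind4.induct with
  | case1 => simp [chunkB_nil, PySem.Chars.join_nil, bodyAcc]
  | case2 x =>
    simp [chunkB_cons, chunkB_nil, PySem.Chars.join_singleton, bodyAcc]
  | case3 x y =>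
    simp only [chunkB_cons, List.take_succ_cons, List.take_nil, List.drop_succ_cons,
      List.drop_nil, chunkB_nil, List.map_cons, List.map_nil,
      PySem.Chars.join_singleton, PySem.Chars.join_cons_cons]
    have hb : bodyAcc 4 [x, y] 0 = (x ++ '-' :: y) ++ ['-'] := by simp [bodyAcc]
    rw [hb, List.dropLast_concat]
    simp
  | case4 x y z =>
    simp only [chunkB_cons, List.take_succ_cons, List.take_nil, List.drop_succ_cons,
      List.drop_nil, chunkB_nil, List.map_cons, List.map_nil,
      PySem.Chars.join_singleton, PySem.Chars.join_cons_cons]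
    have hb : bodyAcc 4 [x, y, z] 0 = (x ++ '-' :: y ++ '-' :: z) ++ ['-'] := by simp [bodyAcc]
    rw [hb, List.dropLast_concat]
    simp
  | case5 x y z w rest ih =>
    rw [chunkB_cons]
    simp only [List.take_succ_cons, List.take_zero, List.drop_succ_cons, List.drop_zero,
      List.map_cons]
    cases rest with
    | nil =>
      simp only [chunkB_nil, List.map_nil, PySem.Chars.join_singleton,
        PySem.Chars.join_cons_cons]
      have hb : bodyAcc 4 [x, y, z, w] 0 = (x ++ '-' :: y ++ '-' :: z ++ '-' :: w) ++ ['\n'] := by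
        simp [bodyAcc]
      rw [hb, List.dropLast_concat]
      simp
    | cons r rs =>
      obtain ⟨q, qs, hch⟩ : ∃ q qs,
          (chunkB (r :: rs) 4).map (fun r => PySem.Chars.join ['-'] r) = q :: qs := by
        rw [chunkB_cons]; exact ⟨_, _, rfl⟩
      rw [hch, PySem.Chars.join_cons_cons, ← hch, ih]
      have hb : bodyAcc 4 (x :: y :: z :: w :: r :: rs) 0
          = (x ++ '-' :: y ++ '-' :: z ++ '-' :: w ++ ['\n']) ++ bodyAcc 4 (r :: rs) 0 := by
        simp [bodyAcc]
      rw [hb, List.dropLast_append_of_ne_nil (bodyAcc_ne_nil 4 r rs 0)]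
      simp [PySem.Chars.join_cons_cons, PySem.Chars.join_singleton]

lemma joinChunk4p (cells : List (List Char)) (h : 4 ≤ cells.length) :
    PySem.Chars.join ['\n'] ((cells.take 3 :: chunkB (cells.drop 3) 4).map (fun r => PySem.Chars.join ['-'] r))
      = (bodyAcc 4 cells 1).dropLast := by
  match cells, h with
  | a :: b :: c :: r :: rs, _ =>
    simp only [List.take_succ_cons, List.take_zero, List.drop_succ_cons, List.drop_zero,
      List.map_cons]
    obtain ⟨q, qs, hch⟩ : ∃ q qs,
        (chunkB (r :: rs) 4).map (fun r => PySem.Chars.join ['-'] r) = q :: qs := by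
      rw [chunkB_cons]; exact ⟨_, _, rfl⟩
    rw [hch, PySem.Chars.join_cons_cons, ← hch, joinChunk4 (r :: rs)]
    have hb : bodyAcc 4 (a :: b :: c :: r :: rs) 1
        = (a ++ '-' :: b ++ '-' :: c ++ ['\n']) ++ bodyAcc 4 (r :: rs) 0 := by
      simp [bodyAcc]
    rw [hb, List.dropLast_append_of_ne_nil (bodyAcc_ne_nil 4 r rs 0)]
    simp [PySem.Chars.join_cons_cons, PySem.Chars.join_singleton]

lemma enumCells (bids : List String) (k : Nat) (pfx : Bool) :
    (PySem.List.enumerate bids (k : Int)).map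
        (fun p => padBidB p.2.toList ((decide (PySem.Int.mod p.1 2 = 0)) == pfx))
      = cellsA bids ((decide (k % 2 = 0)) == pfx) := by
  induction bids generalizing k with
  | nil => simp [PySem.List.enumerate_nil, cellsA]
  | cons b bs ih =>
    rw [PySem.List.enumerate_cons]
    simp only [List.map_cons, cellsA]
    have hm : PySem.Int.mod (k : Int) 2 = ((k % 2 : Nat) : Int) := by
      exact_mod_cast PySem.Int.mod_natCast k 2
    have hd : (decide (PySem.Int.mod (k : Int) 2 = 0)) = (decide (k % 2 = 0)) := by
      rw [hm]; simp; omega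
    have hcast : ((k : Int) + 1) = ((k + 1 : Nat) : Int) := by push_cast; ring
    rw [hd, padEq, hcast, ih (k + 1)]
    have hflag : ((decide ((k + 1) % 2 = 0)) == pfx) = (!((decide (k % 2 = 0)) == pfx)) := by
      by_cases hk : k % 2 = 0
      · have h1 : (k + 1) % 2 = 1 := by omega
        cases pfx <;> simp [hk, h1]
      · have h1 : (k + 1) % 2 = 0 := by omega
        have h2 : k % 2 = 1 := by omega
        cases pfx <;> simp [h1, h2]
    rw [hflag]

lemma enumCells0 (bids : List String) (pfx : Bool) :
    (PySem.List.enumerate bids).map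
        (fun p => padBidB p.2.toList ((decide (PySem.Int.mod p.1 2 = 0)) == pfx))
      = cellsA bids pfx := by
  simpa using enumCells bids 0 pfx

lemma mapPadEq (bids : List String) :
    bids.map (fun b => padBidB b.toList false) = bids.map (fun b => padBidA b false) := by
  simp [padEq]

-- ===== VERDICT (by name: the statement is the Claim_ definition above) =====
theorem sequenceToString_spec : Claim_equal_sequenceToString := by
  intro sequence mode _
  unfold Spec_sequenceToString sequenceToString sequenceToString_alt
  by_cases hU : mode = "Uncontested"
  · simp only [hU]
    have hf := foldU sequence [] 0 (by omega)
    rw [show ((0 : Nat) : Int) = (0 : Int) from rfl] at hf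
    rw [hf, PySem.List.slice_to_neg_one, mapPadEq, joinChunk2]
    simp
  · rw [if_neg hU, if_neg hU]
    by_cases hC : mode = "Competitive"
    · simp only [hC]
      by_cases hp : PySem.Int.mod (sequence.length : Int) 2 = 1 ∧ (sequence.length : Int) > 3
      · have hpfx : decide (PySem.Int.mod (sequence.length : Int) 2 = 1 ∧ (sequence.length : Int) > 3) = true :=
          decide_eq_true hp
        rw [if_pos hp, hpfx, if_pos rfl]
        have hmod2 : PySem.Int.mod ((sequence.length : Nat) : Int) 2 = ((sequence.length % 2 : Nat) : Int) := by
          exact_mod_cast PySem.Int.mod_natCast sequence.length 2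
        have hmod : sequence.length % 2 = 1 := by
          have h1 := hp.1
          rw [hmod2] at h1
          exact_mod_cast h1
        have hgt := hp.2
        have hlen : 5 ≤ sequence.length := by omega
        have hf := foldC sequence "   ".toList true 1 (by omega)
        rw [show ((1 : Nat) : Int) = (1 : Int) from rfl] at hf
        rw [hf, PySem.List.slice_to_neg_one, enumCells0]
        have hlc : 4 ≤ (cellsA sequence true).length := by
          rw [length_cellsA]; omega
        rw [joinChunk4p _ hlc]
        obtain ⟨x, xs, hx⟩ : ∃ x xs, cellsA sequence true = x :: xs := by
          rcases hcc : cellsA sequence true with _ | ⟨x, xs⟩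
          · rw [hcc] at hlc; simp at hlc
          · exact ⟨x, xs, rfl⟩
        rw [hx, List.dropLast_append_of_ne_nil (bodyAcc_ne_nil 4 x xs 1)]
      · have hpfx : decide (PySem.Int.mod (sequence.length : Int) 2 = 1 ∧ (sequence.length : Int) > 3) = false :=
          decide_eq_false hp
        rw [if_neg hp, hpfx, if_neg Bool.false_ne_true]
        have hf := foldC sequence [] false 0 (by omega)
        rw [show ((0 : Nat) : Int) = (0 : Int) from rfl] at hf
        rw [hf, PySem.List.slice_to_neg_one, enumCells0, joinChunk4]
        simp
    · rw [if_neg hC, if_neg hC]
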